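-- pv_equiv track=rewrite | github.com/gyural/codetree-TILs | 240627/두 단어 중 특정 알파벳/specific-alphabet-of-two-words.py | get_set_word
-- ===== SOURCE A (Python) =====
-- def get_set_word(idx, arrays, temp, result):
--     if(len(arrays) == idx):
--         result.append(temp)
--         temp = []
--         return
--     else:
--         for w in arrays[idx]:
--             get_set_word(idx+1, arrays, temp+[w], result)
--     return result
-- ===== SOURCE B (Python) =====
-- def get_set_word(idx, arrays, temp, result):
--     if len(arrays) == idx:
--         result.append(temp)
--         return
--     partial = [temp]
--     for i in range(idx, len(arrays)):
--         partial = [t + [w] for t in partial for w in arrays[i]]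
--     result.extend(partial)
--     return result
-- ===== Notes on version B (the rewrite author's own statement) =====
-- stated objective: alternative
-- what changed: Replaces A's recursive backtracking over word positions by an iterative accumulator fold that repeatedly extends a list of partial combinations with the next position's words, then appends them all to result at once.
import Mathlib
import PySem

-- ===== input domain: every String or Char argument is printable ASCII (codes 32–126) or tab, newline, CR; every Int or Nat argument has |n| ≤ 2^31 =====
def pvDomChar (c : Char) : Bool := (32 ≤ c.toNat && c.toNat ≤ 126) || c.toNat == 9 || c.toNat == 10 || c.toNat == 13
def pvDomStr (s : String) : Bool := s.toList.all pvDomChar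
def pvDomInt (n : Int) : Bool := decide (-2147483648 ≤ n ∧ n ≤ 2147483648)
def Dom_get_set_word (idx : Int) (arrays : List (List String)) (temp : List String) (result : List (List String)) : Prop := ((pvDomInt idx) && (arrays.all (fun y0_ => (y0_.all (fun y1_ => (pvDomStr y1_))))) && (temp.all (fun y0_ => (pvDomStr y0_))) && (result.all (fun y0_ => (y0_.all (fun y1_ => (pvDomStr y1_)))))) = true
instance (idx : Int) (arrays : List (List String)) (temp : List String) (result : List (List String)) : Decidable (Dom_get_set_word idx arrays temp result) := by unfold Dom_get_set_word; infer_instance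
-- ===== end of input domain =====

-- B builds the Cartesian product iteratively with an accumulator instead of A's recursion (objective: alternative).
-- Both Pythons mutate `result` identically inside Pre_; the theorems here are about the RETURN value.

-- ===== PORT A =====
-- helper modelling A's recursive calls (whose return value Python ignores): returns the
-- final contents of the mutated `result` list, none = IndexError; fuel = number of levels left.
def goA (fuel : Nat) (idx : Int) (arrays : List (List String)) (temp : List String) (result : List (List String)) : Option (List (List String)) :=
  if (arrays.length : Int) = idx then some (result ++ [temp])
  else match fuel with
    | 0 => none
    | f+1 =>
      match PySem.List.pyGet? arrays idx with
      | none => none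
      | some ws =>
        ws.foldl (fun acc w => acc.bind (fun r => goA f (idx+1) arrays (temp ++ [w]) r)) (some result)

-- top level: Python A returns None in the base case, else the (mutated) result list.
def get_set_word (idx : Int) (arrays : List (List String)) (temp : List String) (result : List (List String)) : Option (List (List String)) :=
  if (arrays.length : Int) = idx then none
  else goA ((arrays.length : Int) - idx).toNat idx arrays temp result

-- ===== PORT B =====
def get_set_word_alt (idx : Int) (arrays : List (List String)) (temp : List String) (result : List (List String)) : Option (List (List String)) :=
  if (arrays.length : Int) = idx then none
  else
    let part := (PySem.List.pyRange idx arrays.length 1).foldl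
      (fun (part : Option (List (List String))) i =>
        part.bind (fun p =>
          (PySem.List.pyGet? arrays i).map (fun ws =>
            p.flatMap (fun t => ws.map (fun w => t ++ [w])))))
      (some [temp])
    part.map (fun p => result ++ p)

-- ===== PRECONDITION & SPEC =====
-- Pre_ excludes exactly the inputs on which A raises IndexError (arrays[j] out of range).
def Pre_get_set_word (idx : Int) (arrays : List (List String)) (temp : List String) (result : List (List String)) : Prop :=
  -(arrays.length : Int) ≤ idx ∧ idx ≤ (arrays.length : Int)
instance (idx : Int) (arrays : List (List String)) (temp : List String) (result : List (List String)) : Decidable (Pre_get_set_word idx arrays temp result) := by unfold Pre_get_set_word; infer_instance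

def pvWitness_get_set_word : Int × List (List String) × List String × List (List String) :=
  (0, [["a", "b"], ["c"]], [], [])

def Spec_get_set_word (idx : Int) (arrays : List (List String)) (temp : List String) (result : List (List String)) (out : Option (List (List String))) : Prop := out = get_set_word_alt idx arrays temp result
instance (idx : Int) (arrays : List (List String)) (temp : List String) (result : List (List String)) (out : Option (List (List String))) : Decidable (Spec_get_set_word idx arrays temp result out) := by unfold Spec_get_set_word; infer_instance

-- ===== CLAIM (what is proved, stated in full; the proofs are below) =====
def Claim_equal_get_set_word : Prop := ∀ (idx : Int) (arrays : List (List String)) (temp : List String) (result : List (List String)), Dom_get_set_word idx arrays temp result → Pre_get_set_word idx arrays temp result → Spec_get_set_word idx arrays temp result (get_set_word idx arrays temp result)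


-- ===== LEMMAS AND PROOFS =====

-- common specification: the product of word choices for positions idx, idx+1, … (n of them), prefixed by temp
def prodSpec (arrays : List (List String)) : Nat → Int → List String → List (List String)
  | 0, _, temp => [temp]
  | n+1, idx, temp =>
      ((PySem.List.pyGet? arrays idx).getD []).flatMap (fun w => prodSpec arrays n (idx+1) (temp ++ [w]))

lemma foldl_bind_append {κ α : Type} (g : κ → List α → Option (List α)) (P : κ → List α)
    (ws : List κ) (hg : ∀ w r, w ∈ ws → g w r = some (r ++ P w)) :
    ∀ result, ws.foldl (fun acc w => acc.bind (fun r => g w r)) (some result) = some (result ++ ws.flatMap P) := by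
  induction ws with
  | nil => intro result; simp
  | cons w ws ih =>
    intro result
    simp only [List.foldl_cons, Option.bind_some, hg w result (by simp)]
    rw [ih (fun w' r hw' => hg w' r (by simp [hw'])) (result ++ P w)]
    simp

lemma goA_eq (arrays : List (List String)) :
    ∀ (n : Nat) (idx : Int), idx + n = arrays.length → -(arrays.length : Int) ≤ idx →
    ∀ temp result, goA n idx arrays temp result = some (result ++ prodSpec arrays n idx temp) := by
  intro n
  induction n with
  | zero =>
    intro idx h _ temp result
    simp only [goA, prodSpec]
    rw [if_pos (by omega)]
  | succ n ih =>
    intro idx h hlo temp result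
    have hne : ¬ ((arrays.length : Int) = idx) := by omega
    obtain ⟨ws, hws⟩ : ∃ ws, PySem.List.pyGet? arrays idx = some ws := by
      cases h' : PySem.List.pyGet? arrays idx with
      | none =>
        have := (PySem.List.pyGet?_eq_none_iff arrays idx).mp h'
        simp only [PySem.Raise.InRange, not_and, not_lt] at this
        omega
      | some ws => exact ⟨ws, rfl⟩
    simp only [goA, if_neg hne, hws]
    rw [foldl_bind_append _ (fun w => prodSpec arrays n (idx+1) (temp ++ [w])) ws
      (fun w r _ => ih (idx+1) (by omega) (by omega) (temp ++ [w]) r) result]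
    simp [prodSpec, hws]

lemma foldB (arrays : List (List String)) :
    ∀ (n : Nat) (idx : Int), idx + n = arrays.length → -(arrays.length : Int) ≤ idx →
    ∀ (P : List (List String)),
      (PySem.List.pyRange idx arrays.length 1).foldl
        (fun (part : Option (List (List String))) i =>
          part.bind (fun p =>
            (PySem.List.pyGet? arrays i).map (fun ws =>
              p.flatMap (fun t => ws.map (fun w => t ++ [w]))))) (some P)
      = some (P.flatMap (fun t => prodSpec arrays n idx t)) := by
  intro n
  induction n with
  | zero =>
    intro idx h _ P
    rw [PySem.List.pyRange_one_eq_nil (by omega)]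
    simp [prodSpec]
  | succ n ih =>
    intro idx h hlo P
    obtain ⟨ws, hws⟩ : ∃ ws, PySem.List.pyGet? arrays idx = some ws := by
      cases h' : PySem.List.pyGet? arrays idx with
      | none =>
        have := (PySem.List.pyGet?_eq_none_iff arrays idx).mp h'
        simp only [PySem.Raise.InRange, not_and, not_lt] at this
        omega
      | some ws => exact ⟨ws, rfl⟩
    rw [PySem.List.pyRange_one_cons (by omega)]
    simp only [List.foldl_cons, Option.bind_some, hws, Option.map_some]
    rw [ih (idx+1) (by omega) (by omega)]
    congr 1
    simp only [List.flatMap_assoc, List.flatMap_map]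
    simp [prodSpec, hws]

-- ===== VERDICT (by name: the statement is the Claim_ definition above) =====
theorem get_set_word_spec : Claim_equal_get_set_word := by
  intro idx arrays temp result _ hpre
  obtain ⟨hlo, hhi⟩ := hpre
  unfold Spec_get_set_word get_set_word get_set_word_alt
  by_cases heq : (arrays.length : Int) = idx
  · rw [if_pos heq, if_pos heq]
  · rw [if_neg heq, if_neg heq]
    have hn : idx + (((arrays.length : Int) - idx).toNat : Int) = arrays.length := by omega
    rw [goA_eq arrays _ idx hn hlo temp result, foldB arrays _ idx hn hlo [temp]]
    simp
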